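-- pv_equiv track=rewrite | github.com/Donaim/lambda-cc | parser.py | transformMultipleLambdas
-- ===== SOURCE A (Python) =====
-- LAMBDA_SYMBOL = '->'
--
-- def transformMultipleLambdas(s: str) -> str:
--     re = ''
--     last_lambda = False
--     buff = ''
--     for i, c in enumerate(s):
--         if last_lambda:
--             buff += c
--             if s.endswith(LAMBDA_SYMBOL, 0, i + 1):
--                 buff = buff[:-(len(LAMBDA_SYMBOL))].strip()
--                 buff = buff.replace(' ', ' {} \\'.format(LAMBDA_SYMBOL)) + ' '
--                 re += buff + LAMBDA_SYMBOL
--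
--                 buff = ''
--                 last_lambda = False
--         else:
--             if c == '\\':
--                 last_lambda = True
--             re += c
--     return re
-- ===== SOURCE B (Python) =====
-- LAMBDA_SYMBOL = '->'
--
-- def transformMultipleLambdas(s: str) -> str:
--     parts = []
--     while True:
--         b = s.find('\\')
--         if b == -1:
--             parts.append(s)
--             return ''.join(parts)
--         parts.append(s[:b + 1])
--         rest = s[b + 1:]
--         end = rest.find(LAMBDA_SYMBOL)
--         if end == -1:
--             return ''.join(parts)
--         seg = rest[:end].strip().replace(' ', ' {} \\'.format(LAMBDA_SYMBOL)) + ' '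
--         parts.append(seg + LAMBDA_SYMBOL)
--         s = rest[end + len(LAMBDA_SYMBOL):]
-- ===== Notes on version B (the rewrite author's own statement) =====
-- stated objective: faster
-- what changed: Replaced the character-by-character state machine (lambda flag + growing buffer, an endswith test of the whole prefix at every character) by a find-driven scanner that jumps straight to the next backslash and the next arrow token and emits whole slices.
import Mathlib
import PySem

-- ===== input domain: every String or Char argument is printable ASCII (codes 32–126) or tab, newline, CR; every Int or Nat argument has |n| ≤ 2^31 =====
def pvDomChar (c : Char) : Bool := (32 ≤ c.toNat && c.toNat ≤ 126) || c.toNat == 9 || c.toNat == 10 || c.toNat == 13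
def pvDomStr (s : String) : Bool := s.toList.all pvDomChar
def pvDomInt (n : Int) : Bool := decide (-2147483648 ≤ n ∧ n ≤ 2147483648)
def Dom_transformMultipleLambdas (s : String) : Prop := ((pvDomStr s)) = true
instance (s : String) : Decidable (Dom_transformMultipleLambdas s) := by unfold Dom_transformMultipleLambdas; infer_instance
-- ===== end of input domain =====

-- B replaces A's per-character state machine (flag + growing buffer, endswith on every prefix)
-- by a find-driven scanner over whole slices; objective: alternative (same exact result).

-- ===== PORT A =====
-- loop body of A: state is (re, last_lambda, buff), one step per (i, c) of enumerate(s)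
def stepA (s : List Char) (st : List Char × Bool × List Char) (ic : Int × Char) :
    List Char × Bool × List Char :=
  match st, ic with
  | (re, last, buff), (i, c) =>
    if last then
      let buff1 := buff ++ [c]
      if PySem.Chars.endswith (PySem.Chars.slice s none (some (i + 1))) ['-', '>'] then
        let buff2 := PySem.Chars.strip (PySem.Chars.slice buff1 none (some (-(2 : Int))))
        let buff3 := PySem.Chars.replace buff2 [' '] (' ' :: '-' :: '>' :: ' ' :: '\\' :: []) ++ [' ']
        (re ++ buff3 ++ ['-', '>'], false, ([] : List Char))
      else (re, true, buff1)
    else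
      if c = '\\' then (re ++ [c], true, buff) else (re ++ [c], false, buff)

def transformMultipleLambdas (s : String) : String :=
  String.ofList (((PySem.List.enumerate s.toList 0).foldl (stepA s.toList) ([], false, [])).1)

-- ===== PORT B =====
-- Source B's while-loop as structural recursion: each round jumps to the next '\' and the
-- next '->'; the joined parts list is the concatenation of the emitted fragments
def bGo (s : List Char) : List Char :=
  let b := PySem.Chars.find s ['\\']
  if hb : b = -1 then s
  else
    let rest := PySem.Chars.slice s (some (b + 1)) none
    let e := PySem.Chars.find rest ['-', '>']
    if he : e = -1 then PySem.Chars.slice s none (some (b + 1))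
    else
      PySem.Chars.slice s none (some (b + 1)) ++
        (PySem.Chars.replace (PySem.Chars.strip (PySem.Chars.slice rest none (some e))) [' ']
            (' ' :: '-' :: '>' :: ' ' :: '\\' :: []) ++ [' ']) ++ ['-', '>'] ++
        bGo (PySem.Chars.slice rest (some (e + 2)) none)
termination_by s.length
decreasing_by
  have h0 : -1 ≤ PySem.Chars.find s ['\\'] := PySem.Chars.neg_one_le_find s ['\\']
  have hs : s ≠ [] := by
    intro h; subst h; exact hb (by decide)
  have h1 : PySem.List.slice s (some (PySem.Chars.find s ['\\'] + 1)) none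
      = s.drop (PySem.Chars.find s ['\\'] + 1).toNat :=
    PySem.List.slice_from (xs := s) (a := PySem.Chars.find s ['\\'] + 1) (by omega)
  simp only [PySem.Chars.slice_eq_listSlice, h1]
  set t := s.drop (PySem.Chars.find s ['\\'] + 1).toNat with ht
  have h2 : -1 ≤ PySem.Chars.find t ['-', '>'] := PySem.Chars.neg_one_le_find t _
  have h3 : PySem.List.slice t (some (PySem.Chars.find t ['-', '>'] + 2)) none
      = t.drop (PySem.Chars.find t ['-', '>'] + 2).toNat :=
    PySem.List.slice_from (xs := t) (by omega)
  rw [h3]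
  have hlen : t.length ≤ s.length - (PySem.Chars.find s ['\\'] + 1).toNat := by
    rw [ht]; simp
  have : s.length ≠ 0 := by simpa using hs
  have : 1 ≤ (PySem.Chars.find s ['\\'] + 1).toNat := by omega
  simp only [List.length_drop]
  omega

def transformMultipleLambdas_alt (s : String) : String := String.ofList (bGo s.toList)

-- ===== PRECONDITION & SPEC =====
def Spec_transformMultipleLambdas (s : String) (out : String) : Prop := out = transformMultipleLambdas_alt s
instance (s : String) (out : String) : Decidable (Spec_transformMultipleLambdas s out) := by unfold Spec_transformMultipleLambdas; infer_instance

-- ===== CLAIM (what is proved, stated in full; the proofs are below) =====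
def Claim_equal_transformMultipleLambdas : Prop := ∀ (s : String), Dom_transformMultipleLambdas s → Spec_transformMultipleLambdas s (transformMultipleLambdas s)

-- ===== LEMMAS AND PROOFS =====

-- ===== helper lemmas =====

theorem suffix_singleton (q : List Char) (x d : Char) : [x] <:+ q ++ [d] ↔ x = d := by
  rw [← List.reverse_prefix]
  simp [List.cons_prefix_cons]

theorem suffix_pair (p : List Char) (c a b : Char) : [a, b] <:+ p ++ [c] ↔ c = b ∧ [a] <:+ p := by
  rw [← List.reverse_prefix]
  simp [List.cons_prefix_cons, ← List.reverse_prefix]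
  tauto

theorem trigSlice (p : List Char) (c : Char) (w : List Char) :
    PySem.Chars.slice (p ++ c :: w) none (some ((p.length : Int) + 1)) = p ++ [c] := by
  have h : ((p.length : Int) + 1) = ((p.length + 1 : Nat) : Int) := by push_cast; ring
  rw [h]
  simp only [PySem.Chars.slice_eq_listSlice]
  rw [PySem.List.slice_to_natCast, List.take_append]
  simp

-- copy phase: mode off, no backslash in u
theorem copyRun (u : List Char) (h : (¬ '\\' ∈ u)) : ∀ (s w : List Char) (i : Int) (re b0 : List Char),
    (PySem.List.enumerate (u ++ w) i).foldl (stepA s) (re, false, b0)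
      = (PySem.List.enumerate w (i + u.length)).foldl (stepA s) (re ++ u, false, b0) := by
  induction u with
  | nil => intro s w i re b0; simp
  | cons c u' ih =>
      intro s w i re b0
      have hc : ¬ c = '\\' := by simp at h; tauto
      have hu' : ¬ '\\' ∈ u' := by simp at h; tauto
      simp only [List.cons_append, PySem.List.enumerate_cons, List.foldl_cons]
      rw [show stepA s (re, false, b0) (i, c) = (re ++ [c], false, b0) by simp [stepA, hc]]
      rw [ih hu' s w (i+1) (re ++ [c]) b0]
      simp only [List.append_assoc, List.singleton_append, List.length_cons]
      congr 2
      push_cast; omega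

-- mode phase: no trigger while consuming u
theorem modeRun (u : List Char) : ∀ (s q : List Char) (d : Char) (w re b0 : List Char) (i : Int),
    i = (q.length : Int) + 1 →
    s = q ++ d :: (u ++ w) →
    ¬ (['-', '>'] <:+: (d :: u)) →
    (PySem.List.enumerate (u ++ w) i).foldl (stepA s) (re, true, b0)
      = (PySem.List.enumerate w (i + u.length)).foldl (stepA s) (re, true, b0 ++ u) := by
  induction u with
  | nil => intro s q d w re b0 i hi hs h; simp
  | cons c u' ih =>
      intro s q d w re b0 i hi hs h
      simp only [List.cons_append, PySem.List.enumerate_cons, List.foldl_cons]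
      have hnt : PySem.Chars.endswith (PySem.List.slice s none (some (i + 1))) ['-', '>'] = false := by
        rw [← PySem.Chars.slice_eq_listSlice]
        have hs' : s = (q ++ [d]) ++ c :: (u' ++ w) := by simp [hs]
        have hi' : i = ((q ++ [d]).length : Int) := by simp [hi]
        rw [hs', hi', trigSlice]
        rw [Bool.eq_false_iff]
        intro hcontra
        rw [PySem.Chars.endswith_iff] at hcontra
        rw [suffix_pair, suffix_singleton] at hcontra
        apply h
        apply List.infix_cons_iff.mpr
        left
        rcases hcontra with ⟨h1, h2⟩
        subst h1; subst h2
        exact ⟨u', by simp⟩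
      rw [show stepA s (re, true, b0) (i, c) = (re, true, b0 ++ [c]) by
        simp [stepA, hnt]]
      have h' : ¬ (['-', '>'] <:+: (c :: u')) := by
        intro hc; exact h (List.infix_cons_iff.mpr (Or.inr hc))
      rw [ih s (q ++ [d]) c w re (b0 ++ [c]) (i+1) (by simp [hi]) (by simp [hs]) h']
      simp only [List.append_assoc, List.singleton_append, List.length_cons]
      congr 2
      push_cast; omega

theorem findSplit1 (s : List Char) (a : Char) (h : ¬ PySem.Chars.find s [a] = -1) :
    ∃ u t : List Char, s = u ++ a :: t ∧ ¬ a ∈ u ∧ PySem.Chars.find s [a] = (u.length : Int) := by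
  have h0 : 0 ≤ PySem.Chars.find s [a] := by
    have := PySem.Chars.neg_one_le_find s [a]; omega
  obtain ⟨hpre, hmin⟩ := PySem.Chars.find_spec (s := s) (sub := [a]) h0
  set k := (PySem.Chars.find s [a]).toNat with hk
  have hkle : k ≤ s.length := by
    have := PySem.Chars.find_le_length s [a]; omega
  obtain ⟨t, ht⟩ := hpre
  have h1 : s.drop k = a :: t := by rw [← ht]; simp
  refine ⟨s.take k, t, ?_, ?_, ?_⟩
  · conv_lhs => rw [← List.take_append_drop k s]
    rw [h1]
  · intro hmem
    obtain ⟨j, hj, hjs⟩ := List.mem_iff_getElem.mp hmem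
    have hjlt : j < k := lt_of_lt_of_le hj (by simp)
    have hjs' : s[j]'(by omega) = a := by
      rw [List.getElem_take] at hjs; exact hjs
    apply hmin j hjlt
    exact ⟨s.drop (j + 1), by rw [List.singleton_append, ← hjs', ← List.drop_eq_getElem_cons]⟩
  · have : (s.take k).length = k := by simp [hkle]
    rw [this, hk]
    omega

-- decomposition at the first occurrence of "->"
theorem findSplit2 (t : List Char) (h : ¬ PySem.Chars.find t ['-', '>'] = -1) :
    ∃ x y : List Char, t = x ++ '-' :: '>' :: y ∧ PySem.Chars.find t ['-', '>'] = (x.length : Int) ∧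
      (∀ d : Char, ¬ d = '-' → ¬ (['-', '>'] <:+: (d :: x))) := by
  have h0 : 0 ≤ PySem.Chars.find t ['-', '>'] := by
    have := PySem.Chars.neg_one_le_find t ['-', '>']; omega
  obtain ⟨hpre, hmin⟩ := PySem.Chars.find_spec (s := t) (sub := ['-', '>']) h0
  set k := (PySem.Chars.find t ['-', '>']).toNat with hk
  have hkle : k ≤ t.length := by
    have := PySem.Chars.find_le_length t ['-', '>']; omega
  obtain ⟨y, hy⟩ := hpre
  have h1 : t.drop k = '-' :: '>' :: y := by rw [← hy]; simp
  have hxlen : (t.take k).length = k := by simp [hkle]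
  refine ⟨t.take k, y, ?_, ?_, ?_⟩
  · conv_lhs => rw [← List.take_append_drop k t]
    rw [h1]
  · rw [hxlen, hk]; omega
  · intro d hd hinf
    have : PySem.Chars.isIn ['-', '>'] (d :: t.take k) = true :=
      (PySem.Chars.isIn_iff_infix _ _).mpr hinf
    obtain ⟨j, hj⟩ := (PySem.Chars.exists_prefix_drop_iff_isIn _ _).mpr this
    match j with
    | 0 =>
        simp only [List.drop_zero] at hj
        exact hd (List.cons_prefix_cons.mp hj).1.symm
    | j + 1 =>
        simp only [List.drop_succ_cons] at hj
        have hlen2 : 2 ≤ ((t.take k).drop j).length := hj.length_le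
        have hjk : j < k := by
          simp [hxlen] at hlen2 ⊢
          omega
        apply hmin j hjk
        calc ['-', '>'] <+: (t.take k).drop j := hj
          _ <+: t.drop j := by
              rw [List.drop_take]
              exact List.take_prefix _ _

theorem bGo_nil_find (v : List Char) (hf : PySem.Chars.find v ['\\'] = -1) : bGo v = v := by
  rw [bGo]
  simp [hf]

-- B on u ++ '\' :: t when t has no "->"
theorem bGo_noArrow (u t : List Char)
    (hf : PySem.Chars.find (u ++ '\\' :: t) ['\\'] = (u.length : Int))
    (he : PySem.Chars.find t ['-', '>'] = -1) :
    bGo (u ++ '\\' :: t) = u ++ ['\\'] := by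
  rw [bGo]
  have hne : ¬ PySem.Chars.find (u ++ '\\' :: t) ['\\'] = -1 := by rw [hf]; omega
  rw [dif_neg hne]
  have hrest : PySem.List.slice (u ++ '\\' :: t) (some (PySem.Chars.find (u ++ '\\' :: t) ['\\'] + 1)) none = t := by
    rw [hf]
    rw [show ((u.length : Int) + 1) = (((u ++ ['\\']).length : Nat) : Int) by simp]
    rw [PySem.List.slice_from_natCast]
    rw [show u ++ '\\' :: t = (u ++ ['\\']) ++ t by simp]
    exact List.drop_left
  have htake : PySem.List.slice (u ++ '\\' :: t) none (some (PySem.Chars.find (u ++ '\\' :: t) ['\\'] + 1)) = u ++ ['\\'] := by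
    rw [hf]
    rw [show ((u.length : Int) + 1) = (((u ++ ['\\']).length : Nat) : Int) by simp]
    rw [PySem.List.slice_to_natCast]
    rw [show u ++ '\\' :: t = (u ++ ['\\']) ++ t by simp]
    exact List.take_left
  simp only [PySem.Chars.slice_eq_listSlice, hrest, he]
  simpa using htake

theorem bGo_arrow (u x y : List Char)
    (hf : PySem.Chars.find (u ++ '\\' :: (x ++ '-' :: '>' :: y)) ['\\'] = (u.length : Int))
    (he : PySem.Chars.find (x ++ '-' :: '>' :: y) ['-', '>'] = (x.length : Int)) :
    bGo (u ++ '\\' :: (x ++ '-' :: '>' :: y)) =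
      (u ++ ['\\']) ++ (PySem.Chars.replace (PySem.Chars.strip x) [' '] (' ' :: '-' :: '>' :: ' ' :: '\\' :: []) ++ [' ']) ++ ['-', '>'] ++ bGo y := by
  rw [bGo]
  set t := x ++ '-' :: '>' :: y with htdef
  have hne : ¬ PySem.Chars.find (u ++ '\\' :: t) ['\\'] = -1 := by rw [hf]; omega
  rw [dif_neg hne]
  have hrest : PySem.List.slice (u ++ '\\' :: t) (some (PySem.Chars.find (u ++ '\\' :: t) ['\\'] + 1)) none = t := by
    rw [hf]
    rw [show ((u.length : Int) + 1) = (((u ++ ['\\']).length : Nat) : Int) by simp]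
    rw [PySem.List.slice_from_natCast]
    rw [show u ++ '\\' :: t = (u ++ ['\\']) ++ t by simp]
    exact List.drop_left
  have htake : PySem.List.slice (u ++ '\\' :: t) none (some (PySem.Chars.find (u ++ '\\' :: t) ['\\'] + 1)) = u ++ ['\\'] := by
    rw [hf]
    rw [show ((u.length : Int) + 1) = (((u ++ ['\\']).length : Nat) : Int) by simp]
    rw [PySem.List.slice_to_natCast]
    rw [show u ++ '\\' :: t = (u ++ ['\\']) ++ t by simp]
    exact List.take_left
  have hene : ¬ PySem.Chars.find t ['-', '>'] = -1 := by rw [htdef] at he ⊢; rw [he]; omega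
  have hx : PySem.List.slice t none (some (PySem.Chars.find t ['-', '>'])) = x := by
    rw [htdef] at he ⊢; rw [he, PySem.List.slice_to_natCast]
    exact List.take_left
  have hy : PySem.List.slice t (some (PySem.Chars.find t ['-', '>'] + 2)) none = y := by
    rw [htdef] at he ⊢; rw [he]
    rw [show ((x.length : Int) + 2) = (((x ++ ['-', '>']).length : Nat) : Int) by simp]
    rw [PySem.List.slice_from_natCast]
    rw [show x ++ '-' :: '>' :: y = (x ++ ['-', '>']) ++ y by simp]
    exact List.drop_left
  simp only [PySem.Chars.slice_eq_listSlice, hrest, hx, hy, htake]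
  rw [dif_neg hene]

theorem mainLoop : ∀ (n : Nat) (v q re : List Char) (i : Int), v.length ≤ n → i = (q.length : Int) →
    ((PySem.List.enumerate v i).foldl (stepA (q ++ v)) (re, false, ([] : List Char))).1 = re ++ bGo v := by
  intro n
  induction n with
  | zero =>
      intro v q re i hle hi
      have hv : v = [] := List.eq_nil_of_length_eq_zero (Nat.le_zero.mp hle)
      subst hv
      rw [bGo_nil_find [] (by decide)]
      simp [PySem.List.enumerate_nil]
  | succ n IH =>
      intro v q re i hle hi
      by_cases hf : PySem.Chars.find v ['\\'] = -1
      · have hnb : ¬ '\\' ∈ v := by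
          intro hm
          exact ((PySem.Chars.find_eq_neg_one_iff v ['\\']).mp hf)
            ((List.singleton_infix_iff '\\' v).mpr hm)
        have hcr := copyRun v hnb (q ++ v) [] i re []
        simp only [List.append_nil] at hcr
        rw [hcr]
        rw [bGo_nil_find v hf]
        simp [PySem.List.enumerate_nil]
      · obtain ⟨u, t, hv, hu, hflen⟩ := findSplit1 v '\\' hf
        subst hv
        rw [copyRun u hu (q ++ (u ++ '\\' :: t)) ('\\' :: t) i re []]
        rw [PySem.List.enumerate_cons, List.foldl_cons]
        rw [show stepA (q ++ (u ++ '\\' :: t)) (re ++ u, false, []) (i + u.length, '\\')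
              = (re ++ u ++ ['\\'], true, ([] : List Char)) by simp [stepA]]
        by_cases he : PySem.Chars.find t ['-', '>'] = -1
        · have hnoinf : ¬ (['-', '>'] <:+: ('\\' :: t)) := by
            intro hinf
            rcases List.infix_cons_iff.mp hinf with hpre | hinf2
            · exact absurd (List.cons_prefix_cons.mp hpre).1 (by decide)
            · exact ((PySem.Chars.find_eq_neg_one_iff t ['-', '>']).mp he) hinf2
          have hmr := modeRun t (q ++ (u ++ '\\' :: t)) (q ++ u) '\\' [] (re ++ u ++ ['\\']) []
            (i + u.length + 1) (by simp [hi]) (by simp) hnoinf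
          simp only [List.append_nil] at hmr
          rw [hmr]
          rw [bGo_noArrow u t hflen he]
          simp [PySem.List.enumerate_nil]
        · obtain ⟨x, y, ht, helen, hnoinf⟩ := findSplit2 t he
          subst ht
          have hmr := modeRun x (q ++ (u ++ '\\' :: (x ++ '-' :: '>' :: y))) (q ++ u) '\\'
            ('-' :: '>' :: y) (re ++ u ++ ['\\']) [] (i + u.length + 1)
            (by simp [hi]) (by simp) (hnoinf '\\' (by decide))
          rw [hmr]
          simp only [List.nil_append]
          rw [PySem.List.enumerate_cons, List.foldl_cons]
          have hi2 : i + u.length + 1 + x.length = ((q ++ u ++ '\\' :: x).length : Int) := by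
            simp [hi]; push_cast; ring
          have hnt1 : PySem.Chars.endswith (PySem.List.slice (q ++ (u ++ '\\' :: (x ++ '-' :: '>' :: y))) none
              (some (i + u.length + 1 + x.length + 1))) ['-', '>'] = false := by
            rw [← PySem.Chars.slice_eq_listSlice]
            rw [show (q ++ (u ++ '\\' :: (x ++ '-' :: '>' :: y)))
                  = (q ++ u ++ '\\' :: x) ++ '-' :: ('>' :: y) by simp]
            rw [hi2, trigSlice]
            rw [Bool.eq_false_iff]
            intro hc
            rw [PySem.Chars.endswith_iff, suffix_pair] at hc
            exact absurd hc.1 (by decide)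
          rw [show stepA (q ++ (u ++ '\\' :: (x ++ '-' :: '>' :: y))) (re ++ u ++ ['\\'], true, x)
                (i + u.length + 1 + x.length, '-') = (re ++ u ++ ['\\'], true, x ++ ['-']) by
            simp [stepA, hnt1]]
          rw [PySem.List.enumerate_cons, List.foldl_cons]
          have hi3 : i + u.length + 1 + x.length + 1 = (((q ++ u ++ '\\' :: x) ++ ['-']).length : Int) := by
            simp [hi]; push_cast; ring
          have htr : PySem.Chars.endswith (PySem.List.slice (q ++ (u ++ '\\' :: (x ++ '-' :: '>' :: y))) none
              (some (i + u.length + 1 + x.length + 1 + 1))) ['-', '>'] = true := by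
            rw [← PySem.Chars.slice_eq_listSlice]
            rw [show (q ++ (u ++ '\\' :: (x ++ '-' :: '>' :: y)))
                  = ((q ++ u ++ '\\' :: x) ++ ['-']) ++ '>' :: y by simp]
            rw [hi3, trigSlice]
            rw [PySem.Chars.endswith_iff, suffix_pair, suffix_singleton]
            exact ⟨rfl, rfl⟩
          have hbuf : PySem.List.slice (x ++ ['-', '>']) none (some (-(2 : Int))) = x := by
            rw [PySem.List.slice_to_neg_ofNat _ 2 (by omega)]
            rw [show (x ++ ['-', '>']).length - 2 = x.length by simp]
            exact List.take_left
          rw [show stepA (q ++ (u ++ '\\' :: (x ++ '-' :: '>' :: y))) (re ++ u ++ ['\\'], true, x ++ ['-'])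
                (i + u.length + 1 + x.length + 1, '>')
              = (re ++ u ++ ['\\'] ++ (PySem.Chars.replace (PySem.Chars.strip x) [' ']
                  (' ' :: '-' :: '>' :: ' ' :: '\\' :: []) ++ [' ']) ++ ['-', '>'], false, ([] : List Char)) by
            simp [stepA, htr, hbuf]]
          rw [show (q ++ (u ++ '\\' :: (x ++ '-' :: '>' :: y)))
                = (q ++ u ++ '\\' :: (x ++ ['-', '>'])) ++ y by simp]
          rw [IH y (q ++ u ++ '\\' :: (x ++ ['-', '>']))
            (re ++ u ++ ['\\'] ++ (PySem.Chars.replace (PySem.Chars.strip x) [' ']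
              (' ' :: '-' :: '>' :: ' ' :: '\\' :: []) ++ [' ']) ++ ['-', '>'])
            (i + u.length + 1 + x.length + 1 + 1)
            (by simp at hle ⊢; omega) (by simp [hi]; push_cast; ring)]
          rw [bGo_arrow u x y hflen helen]
          simp [List.append_assoc]

-- ===== VERDICT (by name: the statement is the Claim_ definition above) =====
theorem transformMultipleLambdas_spec : Claim_equal_transformMultipleLambdas := by
  unfold Claim_equal_transformMultipleLambdas Spec_transformMultipleLambdas
  intro s _
  unfold transformMultipleLambdas transformMultipleLambdas_alt
  have h := mainLoop s.toList.length s.toList [] [] 0 le_rfl (by simp)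
  simp only [List.nil_append] at h
  rw [h]
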